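-- pv_equiv track=rewrite | github.com/alainSFSF/AI_for_PM | ai_news_scraper.py | filter_posts_by_accounts
-- ===== SOURCE A (Python) =====
-- def filter_posts_by_accounts(posts, accounts):
--     """Filter posts to only include those from specified accounts.
--
--     Returns (filtered_posts, found_accounts, missing_accounts)
--     """
--     if not accounts:
--         return posts, set(), set()
--
--     # Normalize account names (lowercase for comparison)
--     accounts_lower = {a.lower() for a in accounts}
--
--     filtered = []
--     found_accounts = set()
--
--     for post in posts:
--         username = post.get('username', '') or post.get('authorUsername', '')
--         if username.lower() in accounts_lower:
--             filtered.append(post)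
--             found_accounts.add(username.lower())
--
--     missing_accounts = accounts_lower - found_accounts
--
--     return filtered, found_accounts, missing_accounts
-- ===== SOURCE B (Python) =====
-- def filter_posts_by_accounts(posts, accounts):
--     """Filter posts to only include those from specified accounts.
--
--     Returns (filtered_posts, found_accounts, missing_accounts)
--
--     Strategy: index the posts by normalized username once (name -> positions),
--     intersect that index with the target names, then gather the selected
--     positions in ascending order to rebuild the filtered list.
--     """
--     if not accounts:
--         return posts, set(), set()
--
--     targets = {a.lower() for a in accounts}
--
--     # One grouping pass: normalized username -> list of positions (ascending).
--     groups = {}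
--     for i, post in enumerate(posts):
--         name = (post.get('username', '') or post.get('authorUsername', '')).lower()
--         groups.setdefault(name, []).append(i)
--
--     found = {name for name in groups if name in targets}
--     idxs = sorted(i for name in found for i in groups[name])
--     filtered = [posts[i] for i in idxs]
--     return filtered, found, targets - found
-- ===== Notes on version B (the rewrite author's own statement) =====
-- stated objective: alternative
-- what changed: Replaces A's single filter-and-accumulate pass with a group-by index (normalized username -> post positions) built once, set intersection of the index keys with the targets, and a gather of the sorted selected positions to rebuild the filtered list.
import Mathlib
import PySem

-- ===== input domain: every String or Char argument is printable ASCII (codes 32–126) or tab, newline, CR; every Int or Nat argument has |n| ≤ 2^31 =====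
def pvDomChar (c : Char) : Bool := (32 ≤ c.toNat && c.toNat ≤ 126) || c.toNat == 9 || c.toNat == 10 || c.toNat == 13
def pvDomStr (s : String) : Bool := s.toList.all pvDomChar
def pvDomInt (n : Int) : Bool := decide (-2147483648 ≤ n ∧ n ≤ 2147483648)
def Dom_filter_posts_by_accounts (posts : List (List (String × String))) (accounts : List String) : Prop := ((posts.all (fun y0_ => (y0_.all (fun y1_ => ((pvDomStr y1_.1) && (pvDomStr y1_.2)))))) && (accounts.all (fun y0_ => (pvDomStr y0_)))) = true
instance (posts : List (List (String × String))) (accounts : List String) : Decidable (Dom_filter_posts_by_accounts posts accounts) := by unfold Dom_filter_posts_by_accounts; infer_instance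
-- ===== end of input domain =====

-- B replaces A's single filter-and-accumulate pass with a group-by index
-- (normalized username -> post positions) built once, set algebra on the index
-- keys, and a gather of the sorted selected positions; objective: alternative.

-- shared helper: post.get(k, '') on an association-list dict (first match)
def pvGetStr (post : List (String × String)) (k : String) : String :=
  ((post.find? (fun kv => kv.1 == k)).map (·.2)).getD ""

-- post.get('username','') or post.get('authorUsername','')  ('' is falsy)
def pvUser (post : List (String × String)) : String :=
  let u := pvGetStr post "username"
  if u = "" then pvGetStr post "authorUsername" else u

-- ===== PORT A =====
def filter_posts_by_accounts (posts : List (List (String × String))) (accounts : List String) : (List (List (String × String))) × List String × List String :=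
  if accounts.isEmpty then (posts, [], [])
  else
    let accountsLower : PySem.Set String := PySem.Set.ofList (accounts.map PySem.Str.lower)
    let st := posts.foldl
      (fun (st : List (List (String × String)) × PySem.Set String) post =>
        let username := pvUser post
        if PySem.Set.contains accountsLower (PySem.Str.lower username) then
          (st.1 ++ [post], PySem.Set.add st.2 (PySem.Str.lower username))
        else st)
      ([], [])
    (st.1, st.2, PySem.Set.diff accountsLower st.2)

-- ===== PORT B =====
-- the normalized username computed inside Source B's grouping loop
def pvNorm (post : List (String × String)) : String := PySem.Str.lower (pvUser post)

def filter_posts_by_accounts_alt (posts : List (List (String × String))) (accounts : List String) : (List (List (String × String))) × List String × List String :=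
  if accounts.isEmpty then (posts, [], [])
  else
    let targets : PySem.Set String := PySem.Set.ofList (accounts.map PySem.Str.lower)
    -- groups.setdefault(name, []).append(i)  ==  groups[name] = groups.get(name, []) + [i]
    let groups : PySem.Dict String (List Int) :=
      (PySem.List.enumerate posts).foldl
        (fun d ip => d.insert (pvNorm ip.2) (d.getD (pvNorm ip.2) [] ++ [ip.1]))
        PySem.Dict.empty
    let found : PySem.Set String :=
      PySem.Set.ofList (groups.keys.filter (fun n => PySem.Set.contains targets n))
    -- groups[name]: exact as getD, every name in found is a key of groups
    let idxs := PySem.List.sorted (found.flatMap (fun n => groups.getD n [])) (fun i => i)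
    -- posts[i]: exact, every index produced by enumerate is in range
    let filtered := idxs.map (fun i => (PySem.List.pyGet? posts i).getD [])
    (filtered, found, PySem.Set.diff targets found)

-- ===== PRECONDITION & SPEC =====
def Spec_filter_posts_by_accounts (posts : List (List (String × String))) (accounts : List String) (out : (List (List (String × String))) × List String × List String) : Prop := out = filter_posts_by_accounts_alt posts accounts
instance (posts : List (List (String × String))) (accounts : List String) (out : (List (List (String × String))) × List String × List String) : Decidable (Spec_filter_posts_by_accounts posts accounts out) := by unfold Spec_filter_posts_by_accounts; infer_instance

-- ===== CLAIM (what is proved, stated in full; the proofs are below) =====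
def Claim_equal_filter_posts_by_accounts : Prop := ∀ (posts : List (List (String × String))) (accounts : List String), Dom_filter_posts_by_accounts posts accounts → Spec_filter_posts_by_accounts posts accounts (filter_posts_by_accounts posts accounts)

-- ===== LEMMAS AND PROOFS =====

-- A's loop, from any accumulators, appends the filtered posts and folds Set.add
-- over their normalized names.
theorem pvLoop_eq (accountsLower : PySem.Set String) (posts : List (List (String × String))) :
    ∀ (acc : List (List (String × String))) (found : PySem.Set String),
      posts.foldl
        (fun (st : List (List (String × String)) × PySem.Set String) post =>
          let username := pvUser post
          if PySem.Set.contains accountsLower (PySem.Str.lower username) then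
            (st.1 ++ [post], PySem.Set.add st.2 (PySem.Str.lower username))
          else st)
        (acc, found)
      = (acc ++ posts.filter (fun p => PySem.Set.contains accountsLower (pvNorm p)),
         ((posts.filter (fun p => PySem.Set.contains accountsLower (pvNorm p))).map pvNorm).foldl
           PySem.Set.add found) := by
  induction posts with
  | nil => intro acc found; simp
  | cons p ps ih =>
    intro acc found
    by_cases h : PySem.Set.contains accountsLower (pvNorm p) = true
    all_goals
      simp only [List.foldl_cons, List.filter_cons]
      simp only [pvNorm] at ih h ⊢
      simp at ih h
      simp [h, ih, pvNorm]

-- filtering a Python set is forming the set of the filtered list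
theorem pvFoldlAdd_filter {α : Type} [BEq α] [LawfulBEq α] (q : α → Bool) (xs : List α) :
    ∀ (s : PySem.Set α), (xs.foldl PySem.Set.add s).filter q
      = (xs.filter q).foldl PySem.Set.add (s.filter q) := by
  induction xs with
  | nil => intro s; rfl
  | cons x xs ih =>
    intro s
    have key : (PySem.Set.add s x).filter q
        = if q x = true then PySem.Set.add (List.filter q s) x else List.filter q s := by
      by_cases hc : x ∈ s
      · have h1 : PySem.Set.add s x = s := by simp [PySem.Set.add, PySem.Set.contains, hc]
        by_cases hq : q x = true
        · have h2 : x ∈ List.filter q s := List.mem_filter.mpr ⟨hc, hq⟩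
          have h3 : PySem.Set.add (List.filter q s) x = List.filter q s := by
            simp [PySem.Set.add, PySem.Set.contains, h2]
          simp [h1, h3, hq]
        · simp [h1, hq]
      · have h1 : PySem.Set.add s x = s ++ [x] := by
          simp [PySem.Set.add, PySem.Set.contains, hc]
        by_cases hq : q x = true
        · have h2 : x ∉ List.filter q s := fun h => hc (List.mem_of_mem_filter h)
          have h3 : PySem.Set.add (List.filter q s) x = List.filter q s ++ [x] := by
            simp [PySem.Set.add, PySem.Set.contains, h2]
          simp [h1, h3, hq, List.filter_append]
        · simp [h1, hq, List.filter_append]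
    rw [List.foldl_cons, ih, key, List.filter_cons]
    by_cases hq : q x = true
    · simp [hq]
    · simp [hq]

theorem pvOfList_filter {α : Type} [BEq α] [LawfulBEq α] (q : α → Bool) (xs : List α) :
    (PySem.Set.ofList xs).filter q = PySem.Set.ofList (xs.filter q) := by
  rw [PySem.Set.ofList_eq_foldl, PySem.Set.ofList_eq_foldl, pvFoldlAdd_filter]
  rfl

-- the grouping fold: the bucket of n holds the positions whose post normalizes to n
theorem pvGroups_getD (posts : List (List (String × String))) :
    ∀ (s : Int) (d : PySem.Dict String (List Int)) (n : String),
      (((PySem.List.enumerate posts s).foldl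
          (fun d ip => d.insert (pvNorm ip.2) (d.getD (pvNorm ip.2) [] ++ [ip.1])) d).getD n [])
      = d.getD n [] ++ (((PySem.List.enumerate posts s).filter (fun ip => pvNorm ip.2 == n)).map (·.1)) := by
  induction posts with
  | nil => intro s d n; simp [PySem.List.enumerate]
  | cons p ps ih =>
    intro s d n
    rw [PySem.List.enumerate_cons]
    simp only [List.foldl_cons, List.filter_cons]
    rw [ih]
    by_cases h : pvNorm p = n
    · simp [h]
    · have h' : (pvNorm p == n) = false := by simp [h]
      simp [h', PySem.Dict.getD_insert, Ne.symm h]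

-- counting elements of the flatMap of the buckets over a nodup name list
theorem pvCount_flatMap_groups {α κ : Type} [DecidableEq α] [DecidableEq κ]
    (l : List α) (f : α → κ) (names : List κ) (hnd : names.Nodup) (y : α) :
    List.count y (names.flatMap (fun n => l.filter (fun x => f x == n)))
      = if f y ∈ names then List.count y l else 0 := by
  induction names with
  | nil => simp
  | cons m ms ih =>
    have hnd' : ms.Nodup := hnd.of_cons
    have hm : m ∉ ms := by simp at hnd; exact hnd.1
    simp only [List.flatMap_cons, List.count_append, ih hnd']
    by_cases he : f y = m
    · have h1 : List.count y (l.filter (fun x => f x == m)) = List.count y l :=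
        List.count_filter (by simp [he])
      have h2 : f y ∉ ms := he ▸ hm
      simp only [h1, he]
      simp [hm]
    · have h1 : List.count y (l.filter (fun x => f x == m)) = 0 := by
        apply List.count_eq_zero.mpr
        intro hmem
        exact he (by simpa using (List.mem_filter.mp hmem).2)
      simp [h1, he]

-- the flatMap of the buckets is a permutation of the filtered list
theorem pvFlatMap_perm {α κ : Type} [DecidableEq α] [DecidableEq κ]
    (l : List α) (f : α → κ) (q : α → Bool) (names : List κ) (hnd : names.Nodup)
    (h : ∀ x ∈ l, (q x = true ↔ f x ∈ names)) :
    (names.flatMap (fun n => l.filter (fun x => f x == n))).Perm (l.filter q) := by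
  rw [List.perm_iff_count]
  intro y
  rw [pvCount_flatMap_groups l f names hnd y]
  by_cases hy : y ∈ l
  · by_cases hq : q y = true
    · rw [List.count_filter hq, if_pos ((h y hy).mp hq)]
    · have h2 : f y ∉ names := fun hin => hq ((h y hy).mpr hin)
      have h3 : List.count y (l.filter q) = 0 := by
        apply List.count_eq_zero.mpr
        intro hmem
        exact hq (List.mem_filter.mp hmem).2
      simp [h2, h3]
  · have h0 : List.count y l = 0 := List.count_eq_zero.mpr hy
    have h1 : List.count y (l.filter q) = 0 :=
      List.count_eq_zero.mpr fun hmem => hy (List.mem_of_mem_filter hmem)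
    simp [h0, h1]

-- every entry of enumerate indexes its element
theorem pvMem_enumerate {α : Type} (xs : List α) :
    ∀ (s : Int) (ip : Int × α), ip ∈ PySem.List.enumerate xs s →
      ∃ k : Nat, ip.1 = s + k ∧ xs[k]? = some ip.2 := by
  induction xs with
  | nil => intro s ip h; simp [PySem.List.enumerate] at h
  | cons x xs ih =>
    intro s ip h
    rw [PySem.List.enumerate_cons] at h
    rcases List.mem_cons.mp h with h | h
    · exact ⟨0, by simp [h]⟩
    · obtain ⟨k, hk1, hk2⟩ := ih (s + 1) ip h
      exact ⟨k + 1, by push_cast; omega, by simpa using hk2⟩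

-- projecting the filtered enumeration onto its elements filters the list
theorem pvEnum_filter_snd {α : Type} (g : α → Bool) (xs : List α) :
    ∀ (s : Int), ((PySem.List.enumerate xs s).filter (fun ip => g ip.2)).map (·.2)
      = xs.filter g := by
  induction xs with
  | nil => intro s; simp [PySem.List.enumerate]
  | cons x xs ih =>
    intro s
    rw [PySem.List.enumerate_cons]
    by_cases h : g x = true
    · simp [h, ih]
    · simp only [Bool.not_eq_true] at h
      simp [h, ih]

-- ===== VERDICT (by name: the statement is the Claim_ definition above) =====
theorem filter_posts_by_accounts_spec : Claim_equal_filter_posts_by_accounts := by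
  intro posts accounts _
  unfold Spec_filter_posts_by_accounts filter_posts_by_accounts filter_posts_by_accounts_alt
  by_cases hacc : accounts.isEmpty
  · simp [hacc]
  · simp only [hacc, if_false, Bool.false_eq_true]
    rw [pvLoop_eq]
    set T : PySem.Set String := PySem.Set.ofList (accounts.map PySem.Str.lower) with hT
    set E := PySem.List.enumerate posts 0 with hE
    set groups : PySem.Dict String (List Int) :=
      E.foldl (fun d ip => d.insert (pvNorm ip.2) (d.getD (pvNorm ip.2) [] ++ [ip.1]))
        PySem.Dict.empty with hgroups
    -- the keys of groups are the distinct normalized names, in first-occurrence order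
    have hkeys : groups.keys = PySem.Set.ofList (posts.map pvNorm) := by
      rw [hgroups, PySem.Dict.keys_foldl_insert_key E (fun ip => pvNorm ip.2)]
      have : E.map (fun ip => pvNorm ip.2) = posts.map pvNorm := by
        rw [hE, show (fun ip : Int × List (String × String) => pvNorm ip.2)
              = pvNorm ∘ (fun ip : Int × List (String × String) => ip.2) from rfl,
            ← List.map_map, PySem.List.map_snd_enumerate]
      simp [this, PySem.Set.update, PySem.Set.ofList_eq_foldl, PySem.Dict.empty]
    -- the found set of B equals the found set of A
    have h2 : (posts.map pvNorm).filter (fun n => PySem.Set.contains T n)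
        = (posts.filter (fun p => PySem.Set.contains T (pvNorm p))).map pvNorm := by
      rw [List.filter_map]
      rfl
    have hfound : PySem.Set.ofList (groups.keys.filter (fun n => PySem.Set.contains T n))
        = PySem.Set.ofList
            ((posts.filter (fun p => PySem.Set.contains T (pvNorm p))).map pvNorm) := by
      rw [hkeys, pvOfList_filter, h2]
      exact PySem.Set.ofList_eq_self_of_nodup _ (PySem.Set.nodup_ofList _)
    set q' : Int × List (String × String) → Bool :=
      fun ip => PySem.Set.contains T (pvNorm ip.2) with hq'
    set foundB : PySem.Set String :=
      PySem.Set.ofList (groups.keys.filter (fun n => PySem.Set.contains T n)) with hfoundB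
    -- each bucket of groups
    have hbucket : ∀ n, groups.getD n [] = ((E.filter (fun ip => pvNorm ip.2 == n)).map (·.1)) := by
      intro n
      rw [hgroups, pvGroups_getD]
      simp [PySem.Dict.empty, PySem.Dict.getD, PySem.Dict.get?]
      rw [hE]
    -- the flatMap of the buckets over foundB is a permutation of the filtered enumeration
    have hmemE : ∀ ip ∈ E, ip.2 ∈ posts := by
      intro ip hip
      rw [← PySem.List.map_snd_enumerate posts 0]
      exact List.mem_map_of_mem hip
    have hiff : ∀ ip ∈ E, (q' ip = true ↔ pvNorm ip.2 ∈ foundB) := by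
      intro ip hip
      rw [hfound]
      rw [PySem.Set.mem_ofList]
      constructor
      · intro hc
        exact List.mem_map_of_mem
          (List.mem_filter.mpr ⟨hmemE ip hip, hc⟩)
      · intro hm
        obtain ⟨p, hp, hpe⟩ := List.mem_map.mp hm
        have := (List.mem_filter.mp hp).2
        rw [hq']
        simpa [hpe] using this
    have hperm : (foundB.flatMap (fun n => E.filter (fun ip => pvNorm ip.2 == n))).Perm
        (E.filter q') :=
      pvFlatMap_perm E (fun ip => pvNorm ip.2) q' foundB
        (hfoundB ▸ PySem.Set.nodup_ofList _) hiff
    -- the ascending selected positions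
    have hS_pair : (((E.filter q').map (·.1)) : List Int).Pairwise (· < ·) := by
      have hsub : ((E.filter q').map (·.1)).Sublist (E.map (·.1)) :=
        List.Sublist.map _ List.filter_sublist
      have : (E.map (·.1)).Pairwise (· < ·) := by
        rw [hE, PySem.List.map_fst_enumerate]
        exact PySem.List.pairwise_lt_pyRange_one 0 _
      exact this.sublist hsub
    have hLmap : (foundB.flatMap (fun n => groups.getD n []))
        = (foundB.flatMap (fun n => E.filter (fun ip => pvNorm ip.2 == n))).map (·.1) := by
      rw [List.map_flatMap]
      exact List.flatMap_congr (fun n _ => hbucket n)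
    have hsorted : PySem.List.sorted (foundB.flatMap (fun n => groups.getD n [])) (fun i => i)
        = (E.filter q').map (·.1) := by
      apply PySem.List.sorted_eq_of_perm_of_pairwise_lt
      · rw [hLmap]
        exact (hperm.map (·.1)).symm
      · exact hS_pair
    -- gathering the selected positions rebuilds the filtered posts
    have hgather : ((E.filter q').map (·.1)).map (fun i => (PySem.List.pyGet? posts i).getD [])
        = posts.filter (fun p => PySem.Set.contains T (pvNorm p)) := by
      rw [List.map_map]
      have hstep : ∀ ip ∈ E.filter q',
          ((fun i => (PySem.List.pyGet? posts i).getD []) ∘ (·.1)) ip = ip.2 := by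
        intro ip hip
        obtain ⟨k, hk1, hk2⟩ := pvMem_enumerate posts 0 ip (List.mem_of_mem_filter hip)
        have hcast : ip.1 = (k : Int) := by omega
        simp [hcast, PySem.List.pyGet?_natCast, hk2]
      rw [List.map_congr_left hstep]
      have := pvEnum_filter_snd (fun p => PySem.Set.contains T (pvNorm p)) posts 0
      rw [hq']
      exact this
    refine Prod.ext ?_ (Prod.ext ?_ ?_)
    · show ([] ++ posts.filter _) = _
      rw [hsorted, hgather]
      simp
    · show (((posts.filter (fun p => PySem.Set.contains T (pvNorm p))).map pvNorm).foldl
          PySem.Set.add []) = _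
      rw [← PySem.Set.ofList_eq_foldl, ← hfound]
    · show PySem.Set.diff T _ = PySem.Set.diff T _
      rw [← PySem.Set.ofList_eq_foldl, ← hfound]
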